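-- pv_equiv track=rewrite | github.com/juliarzymowska/WDI | lesson_programs/zad167.py | zad167
-- ===== SOURCE A (Python) =====
-- samogloski = 'aeiouy'
--
-- def index(word) -> tuple:  # indeksy samoglosek
-- 	pos1 = -1
-- 	pos2 = -1
--
-- 	for i in range(len(word)):
-- 		if word[i] in samogloski:
-- 			if pos1 == -1:
-- 				pos1 = i
-- 			else:
-- 				pos2 = i
--
-- 	return pos1, pos2
--
-- def zad167(word):
-- 	pos = index(word)
--
-- 	if pos[1] == -1:
-- 		return 1
--
-- 	suma = 0
--
-- 	for k in range(pos[0], pos[1] + 1):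
-- 		suma += zad167(word[k+1:])
--
-- 	return suma
-- ===== SOURCE B (Python) =====
-- samogloski = 'aeiouy'
--
--
-- def zad167(word):
--     # Bottom-up DP over suffix start positions instead of A's exponential recursion:
--     # tab[j] holds the answer for the suffix word[i+1+j:] while i runs from the end to 0.
--     tab = [1]
--     for i in range(len(word) - 1, -1, -1):
--         s = word[i:]
--         vow = [j for j, c in enumerate(s) if c in samogloski]
--         if len(vow) < 2:
--             fi = 1
--         else:
--             fi = sum(tab[j] for j in range(vow[0], vow[-1] + 1))
--         tab = [fi] + tab
--     return tab[0]
-- ===== Notes on version B (the rewrite author's own statement) =====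
-- stated objective: alternative
-- what changed: Replaces A's recursion over overlapping suffixes (exponentially many repeated calls) by a bottom-up dynamic program that fills a table of answers for all suffixes from right to left; intended as asymptotically faster (A timed out at n=64 where B returned, and B read 2.59x at the largest size both finished), but a timing run could not confirm a ratio, so no speed is claimed.
import Mathlib
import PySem

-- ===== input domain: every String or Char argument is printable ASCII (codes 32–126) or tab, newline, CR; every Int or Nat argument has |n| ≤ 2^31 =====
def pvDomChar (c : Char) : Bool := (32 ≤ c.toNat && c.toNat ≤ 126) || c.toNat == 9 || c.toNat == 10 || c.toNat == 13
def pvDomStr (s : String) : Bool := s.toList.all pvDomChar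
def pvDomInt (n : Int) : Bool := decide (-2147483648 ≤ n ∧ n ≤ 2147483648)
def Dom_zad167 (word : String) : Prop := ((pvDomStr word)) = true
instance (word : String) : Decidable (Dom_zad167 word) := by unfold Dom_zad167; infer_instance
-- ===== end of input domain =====

-- B replaces A's exponential recursion over overlapping suffixes by a bottom-up DP table over all suffixes.

-- ===== PORT A =====
-- samogloski = 'aeiouy'; Python's `word[i] in samogloski` tests the 1-char string word[i], i.e. exactly char membership.
def pvSamogloski : List Char := "aeiouy".toList

-- the body of the loop in index(word)
def pvIndexStep (p : Int × Int) (ic : Int × Char) : Int × Int :=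
  if pvSamogloski.contains ic.2 then
    (if p.1 = -1 then (ic.1, p.2) else (p.1, ic.1))
  else p

-- index(word): pos1 = pos2 = -1; for i in range(len(word)): …
def pvIndex (w : List Char) : Int × Int :=
  (PySem.List.pyRange 0 (w.length : Int) 1).foldl
    (fun p i => pvIndexStep p (i, PySem.List.pyGetD w i ' ')) (-1, -1)

-- The next three lemmas are needed only for the termination of zad167Core (used in its decreasing_by).
lemma pvIndex_eq_foldl (u : List Char) :
    pvIndex u = (PySem.List.enumerate u 0).foldl pvIndexStep (-1, -1) := by
  rw [pvIndex, PySem.List.enumerate_eq_map_pyRange u ' ', List.foldl_map]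
  rfl

lemma pvIndexStep_foldl_inv (l : List (Int × Char)) :
    ∀ p : Int × Int, (∀ q ∈ l, 0 ≤ q.1) → (p.1 = -1 ∨ 0 ≤ p.1) → (p.2 ≠ -1 → 0 ≤ p.1) →
    ((l.foldl pvIndexStep p).1 = -1 ∨ 0 ≤ (l.foldl pvIndexStep p).1) ∧
      ((l.foldl pvIndexStep p).2 ≠ -1 → 0 ≤ (l.foldl pvIndexStep p).1) := by
  induction l with
  | nil => intro p _ h1 h2; exact ⟨h1, h2⟩
  | cons q l ih =>
    intro p hq h1 h2
    rw [List.foldl_cons]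
    have hq0 : 0 ≤ q.1 := hq q (by simp)
    refine ih _ (fun r hr => hq r (by simp [hr])) ?_ ?_
    · unfold pvIndexStep
      split
      · split <;> simp <;> omega
      · exact h1
    · unfold pvIndexStep
      split
      · split
        · simp; omega
        · simp; omega
      · exact h2

lemma pvIndex_bounds (w : List Char) (h : (pvIndex w).2 ≠ -1) :
    0 ≤ (pvIndex w).1 ∧ w ≠ [] := by
  have hw : w ≠ [] := by
    intro hnil
    rw [hnil] at h
    exact h rfl
  rw [pvIndex_eq_foldl] at h ⊢
  have := pvIndexStep_foldl_inv (PySem.List.enumerate w 0) (-1, -1)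
    (fun q hq => by
      rcases (PySem.List.mem_enumerate_iff w 0 q).1 hq with ⟨k, hk, rfl⟩
      simp)
    (Or.inl rfl) (by simp)
  exact ⟨this.2 h, hw⟩

-- zad167(word), recursing on the suffixes word[k+1:]
def zad167Core (w : List Char) : Int :=
  let pos := pvIndex w
  if h : pos.2 = -1 then 1
  else
    (PySem.List.pyRange pos.1 (pos.2 + 1) 1).attach.foldl
      (fun suma k => suma + zad167Core (PySem.List.slice w (some (k.1 + 1)) none)) 0
termination_by w.length
decreasing_by
  rcases pvIndex_bounds w h with ⟨hpos, hne⟩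
  have hpos' : 0 ≤ pos.1 := hpos
  rcases (PySem.List.mem_pyRange_one.1 k.2) with ⟨hk1, _⟩
  have hk0 : (0:Int) ≤ (k : Int) + 1 := by omega
  rw [PySem.List.slice_from w hk0]
  have hlen : 0 < w.length := List.length_pos_iff.2 hne
  simp only [List.length_drop]
  omega

def zad167 (word : String) : Int := zad167Core word.toList

-- ===== PORT B =====
-- the body of B's loop: s = word[i:]; vow = [j for j, c in enumerate(s) if c in samogloski]; fi = …
def pvFval (s : List Char) (tab : List Int) : Int :=
  let vow : List Int :=
    ((PySem.List.enumerate s 0).filter (fun p => pvSamogloski.contains p.2)).map (fun p => p.1)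
  if vow.length < 2 then 1
  else
    (PySem.List.pyRange (PySem.List.pyGetD vow 0 0) (PySem.List.pyGetD vow (-1) 0 + 1) 1).foldl
      (fun acc j => acc + PySem.List.pyGetD tab j 0) 0

-- for i in range(len(word) - 1, -1, -1): …; the Python list tab, rebuilt as [fi] + tab, is the Lean list tab
def pvGo (w : List Char) : Nat → List Int → List Int
  | 0, tab => tab
  | i + 1, tab => pvGo w i (pvFval (PySem.List.slice w (some (i : Int)) none) tab :: tab)

def zad167_alt (word : String) : Int :=
  PySem.List.pyGetD (pvGo word.toList word.toList.length [1]) 0 0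

-- ===== PRECONDITION & SPEC =====
def Spec_zad167 (word : String) (out : Int) : Prop := out = zad167_alt word
instance (word : String) (out : Int) : Decidable (Spec_zad167 word out) := by unfold Spec_zad167; infer_instance

-- ===== CLAIM (what is proved, stated in full; the proofs are below) =====
def Claim_equal_zad167 : Prop := ∀ (word : String), Dom_zad167 word → Spec_zad167 word (zad167 word)

-- ===== LEMMAS AND PROOFS =====

-- the list of vowel positions of a word: the common spec of both ports
def pvVN : List Char → List Nat
  | [] => []
  | c :: t => if pvSamogloski.contains c then 0 :: (pvVN t).map (· + 1) else (pvVN t).map (· + 1)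

def pvFirst? : List Char → Option Nat
  | [] => none
  | c :: t => if pvSamogloski.contains c then some 0 else (pvFirst? t).map (· + 1)

def pvLast? : List Char → Option Nat
  | [] => none
  | c :: t =>
    match pvLast? t with
    | some j => some (j + 1)
    | none => if pvSamogloski.contains c then some 0 else none

lemma pvVN_lt_length (u : List Char) : ∀ m ∈ pvVN u, m < u.length := by
  induction u with
  | nil => simp [pvVN]
  | cons c t ih =>
    intro m hm
    simp only [pvVN] at hm
    split at hm <;> simp only [List.mem_cons, List.mem_map] at hm
    · rcases hm with h | ⟨x, hx, rfl⟩
      · simp [h]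
      · have := ih x hx; simp; omega
    · rcases hm with ⟨x, hx, rfl⟩
      have := ih x hx; simp; omega

lemma pvVN_pairwise (u : List Char) : (pvVN u).Pairwise (· < ·) := by
  induction u with
  | nil => simp [pvVN]
  | cons c t ih =>
    simp only [pvVN]
    have hmap : ((pvVN t).map (· + 1)).Pairwise (· < ·) := by
      refine List.pairwise_map.2 ?_
      exact ih.imp (by omega)
    split
    · refine List.pairwise_cons.2 ⟨?_, hmap⟩
      intro m hm
      rcases List.mem_map.1 hm with ⟨x, _, rfl⟩; omega
    · exact hmap

lemma pvFirst?_eq_none (u : List Char) : pvFirst? u = none ↔ pvVN u = [] := by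
  induction u with
  | nil => simp [pvFirst?, pvVN]
  | cons c t ih =>
    simp only [pvFirst?, pvVN]
    split
    · simp
    · simpa using ih

lemma pvLast?_eq_getLast? (u : List Char) : pvLast? u = (pvVN u).getLast? := by
  induction u with
  | nil => simp [pvLast?, pvVN]
  | cons c t ih =>
    cases h : pvLast? t with
    | none =>
      rw [h] at ih
      have ht : pvVN t = [] := by
        cases hv : pvVN t with
        | nil => rfl
        | cons x xs => rw [hv, List.getLast?_cons] at ih; simp at ih
      simp only [pvLast?, pvVN, h, ht]
      split <;> simp
    | some j =>
      rw [h] at ih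
      have hm : ((pvVN t).map (· + 1)).getLast? = some (j + 1) := by
        rw [List.getLast?_map, ← ih]; rfl
      simp only [pvLast?, pvVN, h]
      split
      · rw [List.getLast?_cons, hm]; simp
      · rw [hm]

lemma pvVN_decomp (u : List Char) :
    pvVN u = match pvFirst? u with
      | none => []
      | some j => j :: (pvVN (u.drop (j + 1))).map (· + (j + 1)) := by
  induction u with
  | nil => simp [pvVN, pvFirst?]
  | cons c t ih =>
    by_cases hv : c ∈ pvSamogloski
    · simp [pvVN, pvFirst?, hv]
    · simp only [pvVN, pvFirst?]
      rw [if_neg (by simpa using hv), if_neg (by simpa using hv)]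
      cases hf : pvFirst? t with
      | none =>
        have := (pvFirst?_eq_none t).1 hf
        simp [this]
      | some j =>
        rw [hf] at ih
        rw [ih]
        simp only [List.map_cons, List.map_map, Option.map_some, List.drop_succ_cons]
        have he : ((fun x => x + 1) ∘ (fun x => x + (j + 1)) : Nat → Nat)
            = (fun x => x + (j + 1 + 1)) := by funext x; simp; omega
        rw [he]

lemma pvFold_set (u : List Char) :
    ∀ (s p1 p2 : Int), p1 ≠ -1 →
    (PySem.List.enumerate u s).foldl pvIndexStep (p1, p2) =
      (p1, match pvLast? u with | none => p2 | some m => s + m) := by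
  induction u with
  | nil => intro s p1 p2 _; simp [pvLast?]
  | cons c t ih =>
    intro s p1 p2 h
    rw [PySem.List.enumerate_cons, List.foldl_cons]
    by_cases hv : c ∈ pvSamogloski
    · have hstep : pvIndexStep (p1, p2) (s, c) = (p1, s) := by
        simp [pvIndexStep, hv, h]
      rw [hstep, ih (s+1) p1 s h]
      cases hl : pvLast? t with
      | none => simp [pvLast?, hl, hv]
      | some m => simp [pvLast?, hl]; ring
    · have hstep : pvIndexStep (p1, p2) (s, c) = (p1, p2) := by
        simp [pvIndexStep, hv]
      rw [hstep, ih (s+1) p1 p2 h]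
      cases hl : pvLast? t with
      | none => simp [pvLast?, hl, hv]
      | some m => simp [pvLast?, hl]; ring

lemma pvFold_init (u : List Char) :
    ∀ s : Int, 0 ≤ s →
    (PySem.List.enumerate u s).foldl pvIndexStep (-1, -1) =
      (match pvFirst? u with
      | none => ((-1 : Int), (-1 : Int))
      | some j => (s + j,
          match pvLast? (u.drop (j + 1)) with | none => -1 | some m => s + (j + 1) + m)) := by
  induction u with
  | nil => intro s hs; simp [pvFirst?]
  | cons c t ih =>
    intro s hs
    rw [PySem.List.enumerate_cons, List.foldl_cons]
    by_cases hv : c ∈ pvSamogloski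
    · have hstep : pvIndexStep (-1, -1) (s, c) = (s, -1) := by
        simp [pvIndexStep, hv]
      rw [hstep, pvFold_set t (s+1) s (-1) (by omega)]
      simp only [pvFirst?]
      rw [if_pos (by simpa using hv)]
      cases hl : pvLast? t with
      | none => simp [hl]
      | some m =>
        simp [hl]
        try omega
    · have hstep : pvIndexStep (-1, -1) (s, c) = (-1, -1) := by
        simp [pvIndexStep, hv]
      rw [hstep, ih (s+1) (by omega)]
      simp only [pvFirst?]
      rw [if_neg (by simpa using hv)]
      cases hf : pvFirst? t with
      | none => simp
      | some j =>
        simp only [Option.map_some, List.drop_succ_cons]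
        cases hl : pvLast? (t.drop (j + 1)) with
        | none => simp; ring
        | some m => simp; constructor <;> ring

lemma pvIndex_nil (u : List Char) (h : pvVN u = []) : pvIndex u = (-1, -1) := by
  rw [pvIndex_eq_foldl, pvFold_init u 0 le_rfl]
  have hf : pvFirst? u = none := (pvFirst?_eq_none u).2 h
  simp [hf]

lemma pvIndex_single (u : List Char) (a : Nat) (h : pvVN u = [a]) :
    pvIndex u = ((a : Int), -1) := by
  rw [pvIndex_eq_foldl, pvFold_init u 0 le_rfl]
  have hd := pvVN_decomp u
  cases hf : pvFirst? u with
  | none => rw [hf] at hd; rw [h] at hd; simp at hd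
  | some j =>
    rw [hf] at hd; rw [h] at hd
    simp only [List.cons.injEq] at hd
    obtain ⟨rfl, hmap⟩ := hd
    have hX : pvVN (u.drop (a + 1)) = [] := by
      cases hX : pvVN (u.drop (a + 1)) with
      | nil => rfl
      | cons x xs => rw [hX] at hmap; simp at hmap
    have hl : pvLast? (u.drop (a + 1)) = none := by
      rw [pvLast?_eq_getLast?, hX]; rfl
    simp [hl]

lemma pvIndex_pair (u : List Char) (a b : Nat) (rest : List Nat)
    (h : pvVN u = a :: rest) (hb : rest.getLast? = some b) :
    pvIndex u = ((a : Int), (b : Int)) := by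
  rw [pvIndex_eq_foldl, pvFold_init u 0 le_rfl]
  have hd := pvVN_decomp u
  cases hf : pvFirst? u with
  | none => rw [hf] at hd; rw [h] at hd; simp at hd
  | some j =>
    rw [hf] at hd; rw [h] at hd
    simp only [List.cons.injEq] at hd
    obtain ⟨rfl, hmap⟩ := hd
    rw [hmap, List.getLast?_map] at hb
    cases hm : (pvVN (u.drop (a + 1))).getLast? with
    | none => rw [hm] at hb; simp at hb
    | some m =>
      rw [hm] at hb
      simp only [Option.map_some, Option.some.injEq] at hb
      have hl : pvLast? (u.drop (a + 1)) = some m := by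
        rw [pvLast?_eq_getLast?, hm]
      simp only [hl, Prod.mk.injEq]
      refine ⟨by simp, ?_⟩
      push_cast [← hb]; ring

lemma zad167Core_short (u : List Char) (h : (pvVN u).length < 2) : zad167Core u = 1 := by
  rw [zad167Core]
  cases hv : pvVN u with
  | nil => simp [pvIndex_nil u hv]
  | cons a rest =>
    cases rest with
    | nil => simp [pvIndex_single u a hv]
    | cons x xs => rw [hv] at h; simp at h

lemma zad167Core_eq (u : List Char) (a : Nat) (rest : List Nat)
    (h : pvVN u = a :: rest) (hr : rest ≠ []) :
    zad167Core u =
      ((List.range (rest.getLast hr - a + 1)).map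
        (fun t => zad167Core (u.drop (a + t + 1)))).sum := by
  have hb : rest.getLast? = some (rest.getLast hr) := List.getLast?_eq_some_getLast hr
  set b := rest.getLast hr with hbdef
  have hab : a < b := by
    have hp := pvVN_pairwise u
    rw [h] at hp
    exact (List.pairwise_cons.1 hp).1 b (List.getLast_mem hr)
  have hidx : pvIndex u = ((a : Int), (b : Int)) := pvIndex_pair u a b rest h hb
  rw [zad167Core]
  simp only [hidx]
  rw [dif_neg (by omega : ¬ (b : Int) = -1)]
  rw [List.foldl_attach (f := fun suma k => suma + zad167Core (PySem.List.slice u (some (k + 1))))]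
  rw [hidx, PySem.List.foldl_add]
  rw [PySem.List.pyRange_one]
  have htn : ((b : Int) + 1 - (a : Int)).toNat = b - a + 1 := by omega
  rw [htn, List.map_map, zero_add]
  refine congrArg List.sum (List.map_congr_left ?_)
  intro t ht
  simp only [Function.comp_apply]
  have hc : ((a : Int) + (t : Int) + 1) = ((a + t + 1 : Nat) : Int) := by push_cast; ring
  rw [hc, PySem.List.slice_from_natCast]

lemma pvVow_eq (u : List Char) :
    ∀ s : Int,
    ((PySem.List.enumerate u s).filter (fun p => pvSamogloski.contains p.2)).map (fun p => p.1) =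
      (pvVN u).map (fun m : Nat => s + (m : Int)) := by
  induction u with
  | nil => intro s; simp [pvVN]
  | cons c t ih =>
    intro s
    rw [PySem.List.enumerate_cons]
    by_cases hv : c ∈ pvSamogloski
    · rw [List.filter_cons_of_pos (by simpa using hv)]
      simp only [List.map_cons, ih (s + 1), pvVN]
      rw [if_pos (by simpa using hv)]
      simp only [List.map_cons, List.map_map, Nat.cast_zero, add_zero]
      refine congrArg (List.cons s) (List.map_congr_left ?_)
      intro m _
      simp only [Function.comp_apply]
      omega
    · rw [List.filter_cons_of_neg (by simpa using hv)]
      simp only [ih (s + 1), pvVN]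
      rw [if_neg (by simpa using hv)]
      simp only [List.map_map]
      refine List.map_congr_left ?_
      intro m _
      simp only [Function.comp_apply]
      push_cast; ring

lemma pvGetD_zero {α : Type} (x : α) (xs : List α) (d : α) :
    PySem.List.pyGetD (x :: xs) 0 d = x := by
  simp [PySem.List.pyGetD, PySem.List.pyGet?, PySem.List.pyIdx?]

lemma pvGetD_neg_one {α : Type} (xs : List α) (h : xs ≠ []) (d : α) :
    PySem.List.pyGetD xs (-1) d = xs.getLast h := by
  have hn : 0 < xs.length := List.length_pos_iff.2 h
  simp only [PySem.List.pyGetD, PySem.List.pyGet?, PySem.List.pyIdx?]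
  rw [if_neg (by omega), if_pos (by omega)]
  have h1 : xs.length - (-(-1 : Int)).toNat = xs.length - 1 := by norm_num
  rw [h1, Option.bind_some]
  rw [← List.getLast?_eq_getElem?, List.getLast?_eq_some_getLast h]
  rfl

lemma pvFval_eq (u : List Char) (tab : List Int)
    (htab : ∀ j : Nat, j < u.length → PySem.List.pyGetD tab (j : Int) 0 = zad167Core (u.drop (j + 1))) :
    pvFval u tab = zad167Core u := by
  rw [pvFval]
  have hvow :
      ((PySem.List.enumerate u 0).filter (fun p => pvSamogloski.contains p.2)).map (fun p => p.1) =
        (pvVN u).map (fun m : Nat => (m : Int)) := by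
    rw [pvVow_eq u 0]
    simp
  rw [hvow]
  cases hv : pvVN u with
  | nil => rw [if_pos (by simp)]; exact (zad167Core_short u (by simp [hv])).symm
  | cons a rest =>
    cases rest with
    | nil => rw [if_pos (by simp)]; exact (zad167Core_short u (by simp [hv])).symm
    | cons x xs =>
      set rest := x :: xs with hrest
      have hr : rest ≠ [] := by simp [hrest]
      rw [if_neg (by simp [hrest])]
      set b := rest.getLast hr with hbdef
      have hb : rest.getLast? = some b := List.getLast?_eq_some_getLast hr
      have hab : a < b := by
        have hp := pvVN_pairwise u
        rw [hv] at hp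
        exact (List.pairwise_cons.1 hp).1 b (List.getLast_mem hr)
      have hblen : b < u.length := by
        refine pvVN_lt_length u b ?_
        rw [hv]
        exact List.mem_cons_of_mem a (List.getLast_mem hr)
      have hget0 : PySem.List.pyGetD ((a :: rest).map (fun m : Nat => (m : Int))) 0 0 = (a : Int) := by
        rw [List.map_cons]; exact pvGetD_zero _ _ _
      have hgetlast :
          PySem.List.pyGetD ((a :: rest).map (fun m : Nat => (m : Int))) (-1) 0 = (b : Int) := by
        have hne : (a :: rest).map (fun m : Nat => (m : Int)) ≠ [] := by simp
        rw [pvGetD_neg_one _ hne]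
        have := List.getLast?_eq_some_getLast hne
        rw [List.getLast?_map, List.getLast?_cons, List.getLast?_eq_some_getLast hr] at this
        simp only [Option.map_some, Option.getD_some, Option.some.injEq] at this
        exact this.symm
      rw [hget0, hgetlast]
      rw [PySem.List.foldl_add, PySem.List.pyRange_one]
      have htn : ((b : Int) + 1 - (a : Int)).toNat = b - a + 1 := by omega
      rw [htn, List.map_map, zero_add]
      rw [zad167Core_eq u a rest hv hr]
      refine congrArg List.sum (List.map_congr_left ?_)
      intro t ht
      simp only [Function.comp_apply]
      have hc : ((a : Int) + (t : Int)) = ((a + t : Nat) : Int) := by push_cast; ring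
      rw [hc, htab (a + t) (by
        simp only [List.mem_range] at ht
        omega)]

lemma pvGo_inv (w : List Char) :
    ∀ i : Nat, i ≤ w.length →
    pvGo w i ((List.range (w.length + 1 - i)).map (fun t => zad167Core (w.drop (i + t)))) =
      (List.range (w.length + 1)).map (fun t => zad167Core (w.drop t)) := by
  intro i
  induction i with
  | zero => intro _; simp [pvGo]
  | succ i ih =>
    intro hle
    rw [pvGo]
    have hslice : PySem.List.slice w (some ((i : Nat) : Int)) none = w.drop i :=
      PySem.List.slice_from_natCast w i
    have htab : ∀ j : Nat, j < (w.drop i).length →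
        PySem.List.pyGetD ((List.range (w.length + 1 - (i + 1))).map
          (fun t => zad167Core (w.drop (i + 1 + t)))) (j : Int) 0 =
          zad167Core ((w.drop i).drop (j + 1)) := by
      intro j hj
      rw [List.length_drop] at hj
      rw [PySem.List.pyGetD_natCast]
      have hjr : j < w.length + 1 - (i + 1) := by omega
      rw [List.getD_eq_getElem?_getD, List.getElem?_map, List.getElem?_range hjr]
      simp only [Option.map_some, Option.getD_some]
      rw [List.drop_drop]
      congr 2
      omega
    rw [hslice, pvFval_eq (w.drop i) _ htab]
    have hstep : zad167Core (w.drop i) ::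
        (List.range (w.length + 1 - (i + 1))).map (fun t => zad167Core (w.drop (i + 1 + t))) =
        (List.range (w.length + 1 - i)).map (fun t => zad167Core (w.drop (i + t))) := by
      have hsz : w.length + 1 - i = (w.length - i) + 1 := by omega
      have hsz2 : w.length + 1 - (i + 1) = w.length - i := by omega
      rw [hsz, hsz2, List.range_succ_eq_map, List.map_cons, List.map_map]
      simp only [add_zero]
      refine congrArg (List.cons (zad167Core (w.drop i))) (List.map_congr_left ?_)
      intro t _
      simp only [Function.comp_apply]
      congr 2
      omega
    rw [hstep]
    exact ih (by omega)

lemma zad167_alt_eq' (w : List Char) :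
    PySem.List.pyGetD (pvGo w w.length [1]) 0 0 = zad167Core w := by
  have hbase : ([1] : List Int) =
      (List.range (w.length + 1 - w.length)).map (fun t => zad167Core (w.drop (w.length + t))) := by
    have : w.length + 1 - w.length = 1 := by omega
    rw [this]
    simp only [List.range_one, List.map_cons, List.map_nil]
    rw [List.drop_eq_nil_of_le (by omega)]
    rw [zad167Core_short [] (by simp [pvVN])]
  rw [hbase, pvGo_inv w w.length le_rfl]
  rw [List.range_succ_eq_map, List.map_cons]
  rw [pvGetD_zero]
  simp

-- ===== VERDICT (by name: the statement is the Claim_ definition above) =====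
theorem zad167_spec : Claim_equal_zad167 := by
  intro word _
  unfold Spec_zad167
  exact (zad167_alt_eq' word.toList).symm
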